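-- pv_equiv track=rewrite | github.com/Julie-pyth/DSA2-Julie | Task 3, Most frequent.py | findMostFrequentFollower
-- ===== SOURCE A (Python) =====
-- def findMostFrequentFollower(inputList: list[str], targetWord: str) -> str:
--     if len(inputList) == 0:
--         return ""
--
--     # Tell hva som følger etter targetWord
--     freq = {}     # ord -> antall ganger det følger etter targetWord
--     last_pos = {} # ord -> siste posisjon der det sto etter targetWord
--
--     # Gå gjennom alle par (ord[i], ord[i+1])
--     i = 0
--     while i < len(inputList) - 1:
--         if inputList[i] == targetWord:
--             follower = inputList[i + 1]
--             if follower in freq: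
--                 freq[follower] = freq[follower] + 1
--             else:
--                 freq[follower] = 1
--             last_pos[follower] = i + 1  # lagre hvor det dukket opp sist
--         i = i + 1
--
--     # Hvis targetWord aldri ble funnet eller ikke hadde noe etter seg
--     if len(freq) == 0:
--         return ""
--
--     # Finn ordet som følger oftest.
--     # Ved likhet: velg det som står SIST i lista.
--     best_word = ""
--     best_count = -1
--     best_last = -1
--
--     for w in freq:
--         count = freq[w]
--         pos = last_pos[w]
--         if count > best_count:
--             best_word = w
--             best_count = count
--             best_last = pos
--         elif count == best_count:
--             if pos > best_last:
--                 best_word = w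
--                 best_last = pos
--
--     return best_word
-- ===== SOURCE B (Python) =====
-- def findMostFrequentFollower(inputList: list[str], targetWord: str) -> str:
--     # One forward pass over adjacent pairs builds only a follower-count dict;
--     # the tie-by-last-position winner is then found by a single backward scan,
--     # with no last-position table at all.
--     counts = {}
--     for prev, cur in zip(inputList, inputList[1:]):
--         if prev == targetWord:
--             counts[cur] = counts.get(cur, 0) + 1
--     if not counts:
--         return ""
--     m = max(counts.values())
--     for i in range(len(inputList) - 1, 0, -1):
--         if inputList[i - 1] == targetWord and counts[inputList[i]] == m:
--             return inputList[i]
--     return ""  # unreachable: some follower attains m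
-- ===== Notes on version B (the rewrite author's own statement) =====
-- stated objective: alternative
-- what changed: B drops A's last-position dict and argmax-over-keys loop entirely: it builds only a follower-count dict over zipped adjacent pairs, takes max of the counts, and finds the tie-by-last-position winner with a single backward scan of the list.
import Mathlib
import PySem

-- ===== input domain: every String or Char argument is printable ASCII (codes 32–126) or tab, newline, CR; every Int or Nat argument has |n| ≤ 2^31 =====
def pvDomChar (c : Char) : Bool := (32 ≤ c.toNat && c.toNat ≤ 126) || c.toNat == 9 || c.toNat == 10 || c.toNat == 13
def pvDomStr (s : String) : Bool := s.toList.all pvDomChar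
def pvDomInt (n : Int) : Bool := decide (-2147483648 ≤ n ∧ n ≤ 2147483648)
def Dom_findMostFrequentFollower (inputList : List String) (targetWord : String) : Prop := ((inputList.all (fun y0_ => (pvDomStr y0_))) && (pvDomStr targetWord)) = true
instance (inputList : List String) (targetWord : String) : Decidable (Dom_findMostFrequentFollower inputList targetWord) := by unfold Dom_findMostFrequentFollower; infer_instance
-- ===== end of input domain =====

-- B replaces A's last-position dict and argmax-over-keys loop by max of the counts plus a
-- single backward scan of the list (same return value; alternative decomposition, same cost).

-- ===== PORT A =====
-- while loop over i = 0 .. len-2; freq/last_pos are Python dicts (PySem.Dict);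
-- inputList[i] / inputList[i+1] are in range, so pyGetD with an unused default is exact,
-- and freq[w]/last_pos[w] in the selection loop have w ∈ keys, so getD is exact there too.
def findMostFrequentFollower (inputList : List String) (targetWord : String) : String :=
  if inputList.length = 0 then "" else
  let st := (PySem.List.pyRange 0 ((inputList.length : Int) - 1) 1).foldl
    (fun (st : PySem.Dict String Int × PySem.Dict String Int) i =>
      if PySem.List.pyGetD inputList i "" == targetWord then
        let follower := PySem.List.pyGetD inputList (i + 1) ""
        let freq' := if st.1.contains follower
          then st.1.insert follower (st.1.getD follower 0 + 1)
          else st.1.insert follower 1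
        (freq', st.2.insert follower (i + 1))
      else st)
    (PySem.Dict.empty, PySem.Dict.empty)
  let freq := st.1
  let last_pos := st.2
  if freq.size = 0 then "" else
  let best := freq.keys.foldl
    (fun (b : String × Int × Int) w =>
      let count := freq.getD w 0
      let pos := last_pos.getD w 0
      if b.2.1 < count then (w, count, pos)
      else if count = b.2.1 then
        (if b.2.2 < pos then (w, count, pos) else b)
      else b)
    ("", -1, -1)
  best.1

-- ===== PORT B =====
-- counts = one dict built over zip(inputList, inputList[1:]); m = max(counts.values())
-- (counts nonempty there, so the none branch of max? is unreachable); backward for-loop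
-- with early return = find? over range(len-1, 0, -1); counts[inputList[i]] is looked up
-- only when inputList[i-1] == targetWord, where the key is present, so getD is exact.
def findMostFrequentFollower_alt (inputList : List String) (targetWord : String) : String :=
  let counts := (inputList.zip inputList.tail).foldl
    (fun (d : PySem.Dict String Int) p =>
      if p.1 == targetWord then d.insert p.2 (d.getD p.2 0 + 1) else d)
    PySem.Dict.empty
  if counts.size = 0 then "" else
  match PySem.List.max? counts.values (fun v => v) with
  | none => ""
  | some m =>
    match (PySem.List.pyRange ((inputList.length : Int) - 1) 0 (-1)).find?
        (fun i => PySem.List.pyGetD inputList (i - 1) "" == targetWord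
               && counts.getD (PySem.List.pyGetD inputList i "") 0 == m) with
    | some i => PySem.List.pyGetD inputList i ""
    | none => ""

-- ===== PRECONDITION & SPEC =====
def Spec_findMostFrequentFollower (inputList : List String) (targetWord : String) (out : String) : Prop := out = findMostFrequentFollower_alt inputList targetWord
instance (inputList : List String) (targetWord : String) (out : String) : Decidable (Spec_findMostFrequentFollower inputList targetWord out) := by unfold Spec_findMostFrequentFollower; infer_instance

-- ===== CLAIM (what is proved, stated in full; the proofs are below) =====
def Claim_equal_findMostFrequentFollower : Prop := ∀ (inputList : List String) (targetWord : String), Dom_findMostFrequentFollower inputList targetWord → Spec_findMostFrequentFollower inputList targetWord (findMostFrequentFollower inputList targetWord)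

-- ===== LEMMAS AND PROOFS =====

-- xs[j] as a total function (every use below has j in range)
def pvG (xs : List String) (j : Nat) : String := xs.getD j ""

-- indices j with xs[j] == t (the source positions of followers), in increasing order
def pvFIdx (xs : List String) (t : String) : List Nat :=
  (List.range (xs.length - 1)).filter (fun j => pvG xs j == t)

-- the followers of t, in order of occurrence
def pvL (xs : List String) (t : String) : List String :=
  (pvFIdx xs t).map (fun j => pvG xs (j + 1))

-- the follower-count dict both programs build
def pvCnt (xs : List String) (t : String) : PySem.Dict String Int :=
  (pvFIdx xs t).foldl
    (fun d j => d.insert (pvG xs (j + 1)) (d.getD (pvG xs (j + 1)) 0 + 1)) PySem.Dict.empty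

-- A's last-position dict
def pvPos (xs : List String) (t : String) : PySem.Dict String Int :=
  (pvFIdx xs t).foldl (fun d j => d.insert (pvG xs (j + 1)) ((j : Int) + 1)) PySem.Dict.empty

def pvCw (xs : List String) (t : String) (w : String) : Int := (pvCnt xs t).getD w 0
def pvPw (xs : List String) (t : String) (w : String) : Int := (pvPos xs t).getD w 0

-- A's selection step, abstracted over the two score functions
def pvStep (cw pw : String → Int) (b : String × Int × Int) (w : String) : String × Int × Int :=
  if b.2.1 < cw w then (w, cw w, pw w)
  else if cw w = b.2.1 then (if b.2.2 < pw w then (w, cw w, pw w) else b)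
  else b

-- lexicographic "w scores no better than u"
def pvLexle (cw pw : String → Int) (w u : String) : Prop :=
  cw w < cw u ∨ (cw w = cw u ∧ pw w ≤ pw u)

theorem pvLexle_trans (cw pw : String → Int) {a b c : String}
    (h1 : pvLexle cw pw a b) (h2 : pvLexle cw pw b c) : pvLexle cw pw a c := by
  unfold pvLexle at *
  rcases h1 with h1 | ⟨h1, h1'⟩ <;> rcases h2 with h2 | ⟨h2, h2'⟩
  · exact Or.inl (lt_trans h1 h2)
  · exact Or.inl (h2 ▸ h1)
  · exact Or.inl (h1 ▸ h2)
  · exact Or.inr ⟨h1.trans h2, le_trans h1' h2'⟩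

-- the zip of a list with its tail, indexed
theorem pv_zip_tail (xs : List String) :
    xs.zip xs.tail
      = (List.range (xs.length - 1)).map (fun j => (pvG xs j, pvG xs (j + 1))) := by
  apply List.ext_getElem
  · simp [List.length_zip]
  · intro i h1 h2
    have hi : i < xs.length - 1 := by simpa using h2
    have hi1 : i < xs.length := by omega
    have hi2 : i + 1 < xs.length := by omega
    simp only [List.getElem_zip, List.getElem_map, List.getElem_range, List.getElem_tail]
    simp [pvG, hi1, hi2]

-- B's dict-building loop builds pvCnt
theorem pvB_fold (xs : List String) (t : String) :
    (xs.zip xs.tail).foldl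
      (fun (d : PySem.Dict String Int) p =>
        if p.1 == t then d.insert p.2 (d.getD p.2 0 + 1) else d)
      PySem.Dict.empty = pvCnt xs t := by
  rw [pv_zip_tail, List.foldl_map]
  unfold pvCnt pvFIdx
  exact PySem.List.foldl_if_eq_foldl_filter (fun j => pvG xs j == t)
    (fun (d : PySem.Dict String Int) j =>
      d.insert (pvG xs (j + 1)) (d.getD (pvG xs (j + 1)) 0 + 1))
    (List.range (xs.length - 1)) PySem.Dict.empty

-- A's pair loop builds (pvCnt, pvPos)
theorem pvA_fold (xs : List String) (t : String) :
    (PySem.List.pyRange 0 ((xs.length : Int) - 1) 1).foldl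
      (fun (st : PySem.Dict String Int × PySem.Dict String Int) i =>
        if PySem.List.pyGetD xs i "" == t then
          let follower := PySem.List.pyGetD xs (i + 1) ""
          let freq' := if st.1.contains follower
            then st.1.insert follower (st.1.getD follower 0 + 1)
            else st.1.insert follower 1
          (freq', st.2.insert follower (i + 1))
        else st)
      (PySem.Dict.empty, PySem.Dict.empty) = (pvCnt xs t, pvPos xs t) := by
  rcases Nat.eq_zero_or_pos xs.length with h0 | h0
  · rw [List.length_eq_zero_iff] at h0
    subst h0
    rfl
  · have hc : ((xs.length : Int) - 1) = ((xs.length - 1 : Nat) : Int) := by omega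
    rw [hc, PySem.List.pyRange_zero_natCast, List.foldl_map]
    have hbody : ∀ (st : PySem.Dict String Int × PySem.Dict String Int),
        ∀ j ∈ List.range (xs.length - 1),
        (fun (st : PySem.Dict String Int × PySem.Dict String Int) (i : Int) =>
          if PySem.List.pyGetD xs i "" == t then
            let follower := PySem.List.pyGetD xs (i + 1) ""
            let freq' := if st.1.contains follower
              then st.1.insert follower (st.1.getD follower 0 + 1)
              else st.1.insert follower 1
            (freq', st.2.insert follower (i + 1))
          else st) st ((j : Nat) : Int)
        = (fun (st : PySem.Dict String Int × PySem.Dict String Int) (j : Nat) =>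
            ((if pvG xs j == t
                then st.1.insert (pvG xs (j + 1)) (st.1.getD (pvG xs (j + 1)) 0 + 1)
                else st.1),
             (if pvG xs j == t
                then st.2.insert (pvG xs (j + 1)) ((j : Int) + 1)
                else st.2))) st j := by
      intro st j _
      have e0 : PySem.List.pyGetD xs ((j : Int)) "" = pvG xs j :=
        PySem.List.pyGetD_natCast xs j ""
      have e1 : PySem.List.pyGetD xs ((j : Int) + 1) "" = pvG xs (j + 1) := by
        rw [show ((j : Int) + 1) = (((j + 1 : Nat)) : Int) by push_cast; ring]
        exact PySem.List.pyGetD_natCast xs (j + 1) ""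
      simp only [e0, e1]
      by_cases ht : pvG xs j == t
      · simp only [ht, if_true]
        by_cases hcont : st.1.contains (pvG xs (j + 1))
        · simp [hcont]
        · rw [Bool.not_eq_true] at hcont
          simp [hcont, PySem.Dict.getD_of_not_contains st.1 0 hcont]
      · simp [ht]
    rw [PySem.List.foldl_congr_mem _ _ _ _ hbody]
    rw [PySem.List.foldl_prod_mk
      (f := fun (d : PySem.Dict String Int) (j : Nat) =>
        if pvG xs j == t then d.insert (pvG xs (j + 1)) (d.getD (pvG xs (j + 1)) 0 + 1) else d)
      (g := fun (d : PySem.Dict String Int) (j : Nat) =>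
        if pvG xs j == t then d.insert (pvG xs (j + 1)) ((j : Int) + 1) else d)]
    unfold pvCnt pvPos pvFIdx
    rw [PySem.List.foldl_if_eq_foldl_filter (fun j => pvG xs j == t)
      (fun (d : PySem.Dict String Int) j =>
        d.insert (pvG xs (j + 1)) (d.getD (pvG xs (j + 1)) 0 + 1))
      (List.range (xs.length - 1)) PySem.Dict.empty]
    rw [PySem.List.foldl_if_eq_foldl_filter (fun j => pvG xs j == t)
      (fun (d : PySem.Dict String Int) j => d.insert (pvG xs (j + 1)) ((j : Int) + 1))
      (List.range (xs.length - 1)) PySem.Dict.empty]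

theorem pvCw_count (xs : List String) (t w : String) :
    pvCw xs t w = (List.count w (pvL xs t) : Int) := by
  unfold pvCw pvCnt
  rw [show (pvFIdx xs t).foldl
      (fun (d : PySem.Dict String Int) j =>
        d.insert (pvG xs (j + 1)) (d.getD (pvG xs (j + 1)) 0 + 1)) PySem.Dict.empty
    = (pvL xs t).foldl (fun (d : PySem.Dict String Int) x =>
        d.insert x (d.getD x 0 + 1)) PySem.Dict.empty from by
      unfold pvL; rw [List.foldl_map]]
  rw [PySem.Dict.getD_foldl_insert_add_one]
  simp [PySem.Dict.getD_empty]

theorem pvCnt_keys (xs : List String) (t : String) :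
    (pvCnt xs t).keys = PySem.Set.ofList (pvL xs t) := by
  unfold pvCnt
  rw [PySem.Dict.keys_foldl_insert_key (pvFIdx xs t) (fun j => pvG xs (j + 1))
    (fun d j => d.getD (pvG xs (j + 1)) 0 + 1) PySem.Dict.empty]
  rw [PySem.Set.ofList_eq_foldl]
  rfl

theorem pvCnt_keys_nodup (xs : List String) (t : String) : (pvCnt xs t).keys.Nodup := by
  unfold pvCnt
  exact PySem.Dict.nodup_keys_foldl_insert_key (pvFIdx xs t) (fun j => pvG xs (j + 1))
    (fun d j => d.getD (pvG xs (j + 1)) 0 + 1) PySem.Dict.empty PySem.Dict.nodup_keys_empty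

-- lookup in a fold of inserts = value of the LAST insertion with that key
theorem pv_getD_foldl_insert_last {β : Type} (l : List β) (key : β → String) (v : β → Int)
    (d : PySem.Dict String Int) (x : String) (dflt : Int) :
    (l.foldl (fun d a => d.insert (key a) (v a)) d).getD x dflt
      = (match l.reverse.find? (fun a => key a == x) with
         | some a => v a
         | none => d.getD x dflt) := by
  induction l generalizing d with
  | nil => simp
  | cons a l ih =>
    simp only [List.foldl_cons, List.reverse_cons, List.find?_append]
    rw [ih]
    cases h : l.reverse.find? (fun a => key a == x) with
    | some b => simp
    | none =>
      by_cases hk : key a = x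
      · subst hk
        simp [List.find?]
      · have hb : (key a == x) = false := beq_eq_false_iff_ne.mpr hk
        simp [List.find?, hb, PySem.Dict.getD_insert, Ne.symm hk]

theorem pv_find?_filter {α : Type} (l : List α) (s q : α → Bool) :
    (l.filter s).find? q = l.find? (fun a => s a && q a) := by
  induction l with
  | nil => rfl
  | cons a l ih =>
    by_cases hs : s a <;> by_cases hq : q a <;>
      simp [hs, hq, ih]

-- find? over the reverse of a strictly increasing list returns the LARGEST hit
theorem pv_find?_reverse_last {l : List Nat} (hs : l.Pairwise (· < ·)) {p : Nat → Bool} {a : Nat}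
    (h : l.reverse.find? p = some a) : ∀ b ∈ l, p b = true → b ≤ a := by
  induction l with
  | nil => simp
  | cons x l ih =>
    rw [List.reverse_cons, List.find?_append] at h
    rw [List.pairwise_cons] at hs
    intro b hb hpb
    cases hf : l.reverse.find? p with
    | some c =>
      rw [hf] at h
      simp only [Option.some_or] at h
      cases h
      rcases List.mem_cons.mp hb with hb | hb
      · subst hb
        have hc : a ∈ l := List.mem_reverse.mp (List.mem_of_find?_eq_some hf)
        exact (hs.1 a hc).le
      · exact ih hs.2 hf b hb hpb
    | none =>
      rw [hf] at h
      simp only [Option.none_or] at h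
      have hxa : x = a ∧ p x = true := by
        by_cases hpx : p x
        · refine ⟨?_, hpx⟩
          have h2 : some x = some a := by simpa [List.find?, hpx] using h
          exact Option.some.inj h2
        · rw [Bool.not_eq_true] at hpx
          simp [List.find?, hpx] at h
      rcases List.mem_cons.mp hb with hb | hb
      · subst hb; exact hxa.1.le
      · exfalso
        have := List.find?_eq_none.mp hf b (List.mem_reverse.mpr hb)
        exact absurd hpb (by simpa using this)

-- invariant of A's selection loop
theorem pv_argmax_aux (cw pw : String → Int) (K : List String) (b : String × Int × Int)
    (hc : b.2.1 = cw b.1) (hp : b.2.2 = pw b.1) :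
    ((K.foldl (pvStep cw pw) b).1 = b.1 ∨ (K.foldl (pvStep cw pw) b).1 ∈ K)
      ∧ (K.foldl (pvStep cw pw) b).2.1 = cw (K.foldl (pvStep cw pw) b).1
      ∧ pvLexle cw pw b.1 (K.foldl (pvStep cw pw) b).1
      ∧ ∀ w ∈ K, pvLexle cw pw w (K.foldl (pvStep cw pw) b).1 := by
  induction K generalizing b with
  | nil =>
    exact ⟨Or.inl rfl, hc, Or.inr ⟨rfl, le_refl _⟩, by simp⟩
  | cons w K ih =>
    have hstep : ∃ b' : String × Int × Int,
        pvStep cw pw b w = b' ∧ b'.2.1 = cw b'.1 ∧ b'.2.2 = pw b'.1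
          ∧ (b'.1 = b.1 ∨ b'.1 = w)
          ∧ pvLexle cw pw b.1 b'.1 ∧ pvLexle cw pw w b'.1 := by
      unfold pvStep
      split_ifs with h1 h2 h3
      · exact ⟨(w, cw w, pw w), rfl, rfl, rfl, Or.inr rfl,
          Or.inl (hc ▸ h1), Or.inr ⟨rfl, le_refl _⟩⟩
      · exact ⟨(w, cw w, pw w), rfl, rfl, rfl, Or.inr rfl,
          Or.inr ⟨by rw [← hc, ← h2], by rw [← hp]; exact h3.le⟩,
          Or.inr ⟨rfl, le_refl _⟩⟩
      · exact ⟨b, rfl, hc, hp, Or.inl rfl, Or.inr ⟨rfl, le_refl _⟩,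
          Or.inr ⟨by rw [h2, hc], by rw [← hp]; exact le_of_not_gt h3⟩⟩
      · refine ⟨b, rfl, hc, hp, Or.inl rfl, Or.inr ⟨rfl, le_refl _⟩, Or.inl ?_⟩
        rw [hc] at h1 h2
        exact lt_of_le_of_ne (le_of_not_gt h1) h2
    obtain ⟨b', hb', hc', hp', hb1', hlexb, hlexw⟩ := hstep
    rw [List.foldl_cons, hb']
    obtain ⟨hmem, hcr, hlex, hall⟩ := ih b' hc' hp'
    refine ⟨?_, hcr, pvLexle_trans cw pw hlexb hlex, ?_⟩
    · rcases hmem with hm | hm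
      · rcases hb1' with h | h
        · exact Or.inl (hm.trans h)
        · exact Or.inr (by rw [hm, h]; exact List.mem_cons_self)
      · exact Or.inr (List.mem_cons_of_mem _ hm)
    · intro v hv
      rcases List.mem_cons.mp hv with hv | hv
      · subst hv; exact pvLexle_trans cw pw hlexw hlex
      · exact hall v hv

theorem pv_argmax (cw pw : String → Int) (u : String) (K' : List String) (h0 : 0 ≤ cw u) :
    (((u :: K').foldl (pvStep cw pw) ("", -1, -1)).1 ∈ u :: K')
      ∧ ((u :: K').foldl (pvStep cw pw) ("", -1, -1)).2.1
          = cw ((u :: K').foldl (pvStep cw pw) ("", -1, -1)).1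
      ∧ ∀ w ∈ u :: K', pvLexle cw pw w ((u :: K').foldl (pvStep cw pw) ("", -1, -1)).1 := by
  have hfirst : pvStep cw pw ("", -1, -1) u = (u, cw u, pw u) := by
    unfold pvStep
    rw [if_pos (lt_of_lt_of_le neg_one_lt_zero h0)]
  rw [List.foldl_cons, hfirst]
  obtain ⟨hmem, hcr, hlex, hall⟩ :=
    pv_argmax_aux cw pw K' (u, cw u, pw u) rfl rfl
  refine ⟨?_, hcr, ?_⟩
  · rcases hmem with hm | hm
    · exact hm ▸ List.mem_cons_self
    · exact List.mem_cons_of_mem _ hm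
  · intro w hw
    rcases List.mem_cons.mp hw with hw | hw
    · subst hw; exact hlex
    · exact hall w hw

-- A in terms of the abstract data
theorem pvA_eq (xs : List String) (t : String) :
    findMostFrequentFollower xs t
      = if xs.length = 0 then "" else
        if (pvCnt xs t).size = 0 then ""
        else ((pvCnt xs t).keys.foldl (pvStep (pvCw xs t) (pvPw xs t)) ("", -1, -1)).1 := by
  simp only [findMostFrequentFollower]
  rw [pvA_fold]
  rfl

-- B in terms of the abstract data
theorem pvB_eq (xs : List String) (t : String) :
    findMostFrequentFollower_alt xs t
      = if (pvCnt xs t).size = 0 then ""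
        else match PySem.List.max? (pvCnt xs t).values (fun v => v) with
          | none => ""
          | some m =>
            match (pvFIdx xs t).reverse.find?
                (fun j => pvCw xs t (pvG xs (j + 1)) == m) with
            | some j => pvG xs (j + 1)
            | none => "" := by
  simp only [findMostFrequentFollower_alt]
  rw [pvB_fold]
  by_cases hz : (pvCnt xs t).size = 0
  · simp [hz]
  · simp only [if_neg hz]
    cases hm : PySem.List.max? (pvCnt xs t).values (fun v => v) with
    | none => rfl
    | some m =>
      show (match (PySem.List.pyRange ((xs.length : Int) - 1) 0 (-1)).find?
              (fun i => PySem.List.pyGetD xs (i - 1) "" == t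
                && (pvCnt xs t).getD (PySem.List.pyGetD xs i "") 0 == m) with
            | some i => PySem.List.pyGetD xs i ""
            | none => "")
          = (match (pvFIdx xs t).reverse.find?
                (fun j => pvCw xs t (pvG xs (j + 1)) == m) with
            | some j => pvG xs (j + 1)
            | none => "")
      have hr : PySem.List.pyRange ((xs.length : Int) - 1) 0 (-1)
          = List.map (fun k : Nat => 1 + (k : Int)) (List.range (xs.length - 1)).reverse := by
        rw [PySem.List.pyRange_neg_one_eq_reverse]
        rw [show ((0 : Int) + 1) = 1 by ring, show ((xs.length : Int) - 1 + 1) = (xs.length : Int) by ring]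
        rw [PySem.List.pyRange_one]
        rw [show ((xs.length : Int) - 1).toNat = xs.length - 1 by omega]
        rw [List.map_reverse]
      rw [hr, List.find?_map]
      have hpred : ((fun i => PySem.List.pyGetD xs (i - 1) "" == t
            && (pvCnt xs t).getD (PySem.List.pyGetD xs i "") 0 == m)
          ∘ (fun k : Nat => 1 + (k : Int)))
          = fun j : Nat => (pvG xs j == t) && (pvCw xs t (pvG xs (j + 1)) == m) := by
        funext j
        have e0 : PySem.List.pyGetD xs (1 + (j : Int) - 1) "" = pvG xs j := by
          rw [show (1 + (j : Int) - 1) = ((j : Nat) : Int) by ring]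
          exact PySem.List.pyGetD_natCast xs j ""
        have e1 : PySem.List.pyGetD xs (1 + (j : Int)) "" = pvG xs (j + 1) := by
          rw [show (1 + (j : Int)) = (((j + 1 : Nat)) : Int) by push_cast; ring]
          exact PySem.List.pyGetD_natCast xs (j + 1) ""
        simp only [Function.comp, e0, e1]
        rfl
      rw [hpred]
      rw [show (List.range (xs.length - 1)).reverse.find?
            (fun j : Nat => (pvG xs j == t) && (pvCw xs t (pvG xs (j + 1)) == m))
          = (pvFIdx xs t).reverse.find? (fun j => pvCw xs t (pvG xs (j + 1)) == m) from by
        rw [← pv_find?_filter (List.range (xs.length - 1)).reverse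
          (fun j => pvG xs j == t) (fun j => pvCw xs t (pvG xs (j + 1)) == m)]
        rw [List.filter_reverse]
        rfl]
      cases hfind : (pvFIdx xs t).reverse.find?
          (fun j => pvCw xs t (pvG xs (j + 1)) == m) with
      | none => rfl
      | some j =>
        show PySem.List.pyGetD xs (1 + (j : Int)) "" = pvG xs (j + 1)
        rw [show (1 + (j : Int)) = (((j + 1 : Nat)) : Int) by push_cast; ring]
        exact PySem.List.pyGetD_natCast xs (j + 1) ""


-- the last-position value pvPw as a reverse search
theorem pvPw_find (xs : List String) (t w : String) :
    pvPw xs t w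
      = (match (pvFIdx xs t).reverse.find? (fun j => pvG xs (j + 1) == w) with
         | some j => (j : Int) + 1
         | none => 0) := by
  unfold pvPw pvPos
  rw [pv_getD_foldl_insert_last (pvFIdx xs t) (fun j => pvG xs (j + 1))
    (fun j => (j : Int) + 1) PySem.Dict.empty w 0]
  cases hx : (pvFIdx xs t).reverse.find? (fun j => pvG xs (j + 1) == w) <;>
    simp [PySem.Dict.getD_empty]

theorem findMostFrequentFollower_main (xs : List String) (t : String) :
    findMostFrequentFollower xs t = findMostFrequentFollower_alt xs t := by
  rw [pvA_eq, pvB_eq]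
  by_cases hn : xs.length = 0
  · have hx : xs = [] := List.length_eq_zero_iff.mp hn
    subst hx
    rfl
  · rw [if_neg hn]
    by_cases hz : (pvCnt xs t).size = 0
    · rw [if_pos hz, if_pos hz]
    · rw [if_neg hz, if_neg hz]
      have hnd := pvCnt_keys_nodup xs t
      have hKlen : (pvCnt xs t).keys.length = (pvCnt xs t).size := by
        simp [PySem.Dict.keys, PySem.Dict.size]
      have hK : (pvCnt xs t).keys ≠ [] := by
        intro h
        apply hz
        rw [← hKlen, h]
        rfl
      obtain ⟨u, K', hKeq⟩ := List.exists_cons_of_ne_nil hK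
      cases hm : PySem.List.max? (pvCnt xs t).values (fun v => v) with
      | none =>
        exfalso
        apply hz
        have hveq : (pvCnt xs t).values = [] :=
          (PySem.List.max?_eq_none_iff _ _).mp hm
        have hvlen : (pvCnt xs t).values.length = (pvCnt xs t).size := by
          simp [PySem.Dict.values, PySem.Dict.size]
        rw [← hvlen, hveq]
        rfl
      | some m =>
        have hv : (pvCnt xs t).values = (pvCnt xs t).keys.map (fun k => pvCw xs t k) :=
          PySem.Dict.values_eq_map_keys (pvCnt xs t) hnd 0
        have hmax : ∀ k ∈ (pvCnt xs t).keys, pvCw xs t k ≤ m := by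
          intro k hk
          have hmem : pvCw xs t k ∈ (pvCnt xs t).values := by
            rw [hv]
            exact List.mem_map_of_mem hk
          exact PySem.List.max?_isMax hm _ hmem
        have hex : ∃ k ∈ (pvCnt xs t).keys, pvCw xs t k = m := by
          have hmem := PySem.List.max?_mem hm
          rw [hv] at hmem
          obtain ⟨k, hk, hkm⟩ := List.mem_map.mp hmem
          exact ⟨k, hk, hkm⟩
        have h0 : 0 ≤ pvCw xs t u := by
          rw [pvCw_count]
          exact Int.natCast_nonneg _
        have hfold := pv_argmax (pvCw xs t) (pvPw xs t) u K' h0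
        rw [← hKeq] at hfold
        obtain ⟨hr1, _, hall⟩ := hfold
        have hcwr : pvCw xs t
            ((pvCnt xs t).keys.foldl (pvStep (pvCw xs t) (pvPw xs t)) ("", -1, -1)).1 = m := by
          obtain ⟨k0, hk0K, hk0m⟩ := hex
          have hle := hall k0 hk0K
          refine le_antisymm (hmax _ hr1) ?_
          rcases hle with h | ⟨h, _⟩
          · exact (hk0m ▸ h).le
          · exact (hk0m ▸ h).le
        set r := ((pvCnt xs t).keys.foldl (pvStep (pvCw xs t) (pvPw xs t)) ("", -1, -1))
          with hrdef
        have hmemL : ∀ w, w ∈ (pvCnt xs t).keys ↔ w ∈ pvL xs t := by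
          intro w
          rw [pvCnt_keys]
          exact PySem.Set.mem_ofList _ _
        have hpair : (pvFIdx xs t).Pairwise (· < ·) :=
          List.Pairwise.sublist List.filter_sublist List.pairwise_lt_range
        have hlastf : ∀ w ∈ pvL xs t, ∃ j0,
            (pvFIdx xs t).reverse.find? (fun j => pvG xs (j + 1) == w) = some j0 := by
          intro w hw
          obtain ⟨jw, hjw, hjweq⟩ := List.mem_map.mp hw
          have hex2 : ∃ x ∈ (pvFIdx xs t).reverse, (pvG xs (x + 1) == w) = true :=
            ⟨jw, List.mem_reverse.mpr hjw, by simp [hjweq]⟩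
          exact Option.isSome_iff_exists.mp (List.find?_isSome.mpr hex2)
        have hrL : r.1 ∈ pvL xs t := (hmemL r.1).mp hr1
        obtain ⟨j0, hj0⟩ := hlastf r.1 hrL
        have hj0eq : pvG xs (j0 + 1) = r.1 := by
          have := List.find?_some hj0
          simpa using this
        have hj0mem : j0 ∈ pvFIdx xs t :=
          List.mem_reverse.mp (List.mem_of_find?_eq_some hj0)
        have hBex : ∃ x ∈ (pvFIdx xs t).reverse,
            (pvCw xs t (pvG xs (x + 1)) == m) = true :=
          ⟨j0, List.mem_reverse.mpr hj0mem, by rw [hj0eq]; simp [hcwr]⟩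
        obtain ⟨js, hjs⟩ := Option.isSome_iff_exists.mp (List.find?_isSome.mpr hBex)
        show r.1 = (match (pvFIdx xs t).reverse.find?
              (fun j => pvCw xs t (pvG xs (j + 1)) == m) with
            | some j => pvG xs (j + 1)
            | none => "")
        rw [hjs]
        show r.1 = pvG xs (js + 1)
        have hjsm : pvCw xs t (pvG xs (js + 1)) = m := by
          have := List.find?_some hjs
          simpa using this
        have hjsmem : js ∈ pvFIdx xs t :=
          List.mem_reverse.mp (List.mem_of_find?_eq_some hjs)
        have hj0le : j0 ≤ js :=
          pv_find?_reverse_last hpair hjs j0 hj0mem (by rw [hj0eq]; simp [hcwr])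
        have hwL : pvG xs (js + 1) ∈ pvL xs t := List.mem_map_of_mem hjsmem
        have hlex := hall _ ((hmemL _).mpr hwL)
        have hpwle : pvPw xs t (pvG xs (js + 1)) ≤ pvPw xs t r.1 := by
          rcases hlex with h | ⟨_, h⟩
          · rw [hjsm, hcwr] at h
            exact absurd h (lt_irrefl m)
          · exact h
        obtain ⟨j1, hj1⟩ := hlastf _ hwL
        have hjsle : js ≤ j1 :=
          pv_find?_reverse_last hpair hj1 js hjsmem (by simp)
        have hpw1 : pvPw xs t (pvG xs (js + 1)) = (j1 : Int) + 1 := by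
          rw [pvPw_find, hj1]
        have hpw0 : pvPw xs t r.1 = (j0 : Int) + 1 := by
          rw [pvPw_find, hj0]
        have hj1le : j1 ≤ j0 := by
          rw [hpw1, hpw0] at hpwle
          omega
        have hjseq : js = j0 := by omega
        rw [hjseq, hj0eq]

-- ===== VERDICT (by name: the statement is the Claim_ definition above) =====
theorem findMostFrequentFollower_spec : Claim_equal_findMostFrequentFollower := by
  intro xs t _
  show _ = _
  exact findMostFrequentFollower_main xs t
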